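-- pv_equiv track=rewrite | github.com/Stegoputer/Slidebuddy | slidebuddy/core/text_utils.py | _split_with_positions
-- ===== SOURCE A (Python) =====
-- def _split_with_positions(text: str, separator: str) -> list[tuple[int, int]]:
--     """Split text by separator and return (start, end) char positions."""
--     parts = []
--     pos = 0
--     sep_len = len(separator)
--     for chunk in text.split(separator):
--         start = pos
--         end = pos + len(chunk)
--         parts.append((start, end))
--         pos = end + sep_len
--     return parts
-- ===== SOURCE B (Python) =====
-- def _split_with_positions(text: str, separator: str) -> list[tuple[int, int]]:
--     """Split text by separator and return (start, end) char positions."""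
--     if not separator:
--         raise ValueError("empty separator")
--     parts = []
--     pos = 0
--     sep_len = len(separator)
--     while True:
--         idx = text.find(separator, pos)
--         if idx == -1:
--             parts.append((pos, len(text)))
--             return parts
--         parts.append((pos, idx))
--         pos = idx + sep_len
-- ===== Notes on version B (the rewrite author's own statement) =====
-- stated objective: alternative
-- what changed: B derives each (start, end) range directly from str.find positions in one running-position loop, instead of materializing all substrings via text.split(separator) and reconstructing positions by summing chunk lengths.
import Mathlib
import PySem

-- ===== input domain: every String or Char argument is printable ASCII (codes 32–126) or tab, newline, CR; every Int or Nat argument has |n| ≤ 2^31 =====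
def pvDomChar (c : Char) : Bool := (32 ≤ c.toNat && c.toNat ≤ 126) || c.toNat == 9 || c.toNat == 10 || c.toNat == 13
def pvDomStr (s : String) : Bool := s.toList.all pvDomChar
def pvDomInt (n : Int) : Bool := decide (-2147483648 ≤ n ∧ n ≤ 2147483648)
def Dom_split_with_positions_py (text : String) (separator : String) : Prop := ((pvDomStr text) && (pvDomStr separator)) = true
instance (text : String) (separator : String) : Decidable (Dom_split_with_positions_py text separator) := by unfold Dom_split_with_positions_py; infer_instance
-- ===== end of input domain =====

-- B computes each (start, end) range directly from str.find positions with a running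
-- position, instead of splitting the text into substrings and summing chunk lengths.


-- ===== PORT A =====
-- for chunk in text.split(separator): append (pos, pos + len(chunk)); pos = end + sep_len
def split_with_positions_py (text : String) (separator : String) : List (Int × Int) :=
  let sepLen : Int := PySem.Str.len separator
  match PySem.Str.split? text separator with
  | none => []   -- separator == "": Python raises ValueError here; excluded by Pre_
  | some chunks =>
    (chunks.foldl
      (fun (st : List (Int × Int) × Int) chunk =>
        let start := st.2
        let stop := st.2 + PySem.Str.len chunk
        (st.1 ++ [(start, stop)], stop + sepLen))
      ([], 0)).1

-- ===== PORT B =====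
-- the while-True loop of Source B: idx = text.find(separator, pos); stop at -1, else advance.
-- fuel (text.length + 1) only makes the recursion total; it is proven never to run out.
def pvBGo (text sep : List Char) (pos : Nat) (fuel : Nat) : List (Int × Int) :=
  match fuel with
  | 0 => []
  | f + 1 =>
    let idx := PySem.Chars.findFrom text sep (pos : Int)
    if idx = -1 then [((pos : Int), (text.length : Int))]
    else ((pos : Int), idx) :: pvBGo text sep (idx.toNat + sep.length) f

def split_with_positions_py_alt (text : String) (separator : String) : List (Int × Int) :=
  if separator.toList.isEmpty then []   -- Source B raises ValueError here; excluded by Pre_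
  else pvBGo text.toList separator.toList 0 (text.toList.length + 1)

-- ===== PRECONDITION & SPEC =====
-- Pre_ excludes exactly separator = "", on which Python's str.split (hence A) raises ValueError (and B raises it too).
def Pre_split_with_positions_py (text : String) (separator : String) : Prop := separator ≠ ""
instance (text : String) (separator : String) : Decidable (Pre_split_with_positions_py text separator) := by unfold Pre_split_with_positions_py; infer_instance

def pvWitness_split_with_positions_py : String × String := ("a, b, c", ", ")

def Spec_split_with_positions_py (text : String) (separator : String) (out : List (Int × Int)) : Prop := out = split_with_positions_py_alt text separator
instance (text : String) (separator : String) (out : List (Int × Int)) : Decidable (Spec_split_with_positions_py text separator out) := by unfold Spec_split_with_positions_py; infer_instance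

-- ===== CLAIM (what is proved, stated in full; the proofs are below) =====
def Claim_equal_split_with_positions_py : Prop := ∀ (text : String) (separator : String), Dom_split_with_positions_py text separator → Pre_split_with_positions_py text separator → Spec_split_with_positions_py text separator (split_with_positions_py text separator)

-- ===== LEMMAS AND PROOFS =====

-- range list generated from the chunk lists (common target of both ports)
def pvGL (m : Int) : List (List Char) → Int → List (Int × Int)
  | [], _ => []
  | c :: cs, p => (p, p + (c.length : Int)) :: pvGL m cs (p + (c.length : Int) + m)

-- unfolding equations for PySem.Chars.splitOn.go
lemma pvGo_nil (sp : List Char) (f : Nat) (cur : List Char) (acc : List (List Char)) :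
    PySem.Chars.splitOn.go sp (f + 1) [] cur acc = (cur.reverse :: acc).reverse := by
  rw [PySem.Chars.splitOn.go]; omega

lemma pvGo_cons (sp : List Char) (f : Nat) (c : Char) (rest cur : List Char) (acc : List (List Char)) :
    PySem.Chars.splitOn.go sp (f + 1) (c :: rest) cur acc =
      (if sp.isPrefixOf (c :: rest) then
        PySem.Chars.splitOn.go sp f (List.drop sp.length (c :: rest)) [] (cur.reverse :: acc)
       else PySem.Chars.splitOn.go sp f rest (c :: cur) acc) := by
  rw [PySem.Chars.splitOn.go]

-- fuel irrelevance + accumulator extraction for splitOn.go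
lemma pvGo_acc (sp : List Char) (hsp : sp ≠ []) :
    ∀ n l, l.length ≤ n → ∀ fuel cur acc, l.length < fuel →
      PySem.Chars.splitOn.go sp fuel l cur acc =
        acc.reverse ++ PySem.Chars.splitOn.go sp (l.length + 1) l cur [] := by
  intro n
  induction n with
  | zero =>
    intro l hl fuel cur acc hf
    have hnil : l = [] := List.length_eq_zero_iff.mp (Nat.le_zero.mp hl)
    subst hnil
    obtain ⟨f, rfl⟩ : ∃ f, fuel = f + 1 := ⟨fuel - 1, by omega⟩
    rw [pvGo_nil, pvGo_nil]; simp
  | succ n ih =>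
    intro l hl fuel cur acc hf
    match l with
    | [] =>
      obtain ⟨f, rfl⟩ : ∃ f, fuel = f + 1 := ⟨fuel - 1, by omega⟩
      rw [pvGo_nil, pvGo_nil]; simp
    | c :: rest =>
      obtain ⟨f, rfl⟩ : ∃ f, fuel = f + 1 := ⟨fuel - 1, by omega⟩
      rw [pvGo_cons, pvGo_cons]
      by_cases hpre : sp.isPrefixOf (c :: rest)
      · simp only [hpre, if_true]
        have hm : 1 ≤ sp.length := by
          cases sp with | nil => exact absurd rfl hsp | cons a b => simp
        have hdl : (List.drop sp.length (c :: rest)).length ≤ n := by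
          simp only [List.length_drop]
          simp at hl ⊢; omega
        rw [ih _ hdl f [] (cur.reverse :: acc) (by simp at hf ⊢; omega),
            ih _ hdl (c :: rest).length [] [cur.reverse] (by simp; omega)]
        simp
      · simp only [hpre, Bool.false_eq_true, if_false]
        have hrl : rest.length ≤ n := by simp at hl; omega
        rw [ih _ hrl f (c :: cur) acc (by simp at hf; omega),
            ih _ hrl (c :: rest).length (c :: cur) [] (by simp)]
        simp

-- no occurrence of sp in l: go returns the single remaining chunk
lemma pvGo_none (sp : List Char) :
    ∀ l fuel cur acc, l.length < fuel → ¬ sp <:+: l →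
      PySem.Chars.splitOn.go sp fuel l cur acc = ((cur.reverse ++ l) :: acc).reverse := by
  intro l
  induction l with
  | nil =>
    intro fuel cur acc hf _
    obtain ⟨f, rfl⟩ : ∃ f, fuel = f + 1 := ⟨fuel - 1, by omega⟩
    rw [pvGo_nil]; simp
  | cons c rest ih =>
    intro fuel cur acc hf hinf
    obtain ⟨f, rfl⟩ : ∃ f, fuel = f + 1 := ⟨fuel - 1, by omega⟩
    rw [pvGo_cons]
    have hpre : sp.isPrefixOf (c :: rest) = false := by
      by_contra h
      exact hinf ((List.isPrefixOf_iff_prefix.mp (by simpa using h)).isInfix)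
    simp only [hpre, Bool.false_eq_true, if_false]
    rw [ih f (c :: cur) acc (by simp at hf; omega)
        (fun h => hinf (h.trans (List.suffix_cons c rest).isInfix))]
    simp

-- occurrence whose first position is j: go emits the chunk before it and restarts after it
lemma pvGo_step (sp : List Char) (hsp : sp ≠ []) :
    ∀ j l fuel cur acc, l.length < fuel → sp <+: l.drop j → (∀ i < j, ¬ sp <+: l.drop i) →
      PySem.Chars.splitOn.go sp fuel l cur acc =
        PySem.Chars.splitOn.go sp (fuel - j - 1) (l.drop (j + sp.length)) []
          ((cur.reverse ++ l.take j) :: acc) := by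
  intro j
  induction j with
  | zero =>
    intro l fuel cur acc hf hpre _
    match l with
    | [] =>
      exfalso
      exact hsp (List.prefix_nil.mp (by simpa using hpre))
    | c :: rest =>
      obtain ⟨f, rfl⟩ : ∃ f, fuel = f + 1 := ⟨fuel - 1, by omega⟩
      rw [pvGo_cons]
      have : sp.isPrefixOf (c :: rest) = true := List.isPrefixOf_iff_prefix.mpr (by simpa using hpre)
      simp [this]
  | succ j ih =>
    intro l fuel cur acc hf hpre hmin
    match l with
    | [] =>
      exfalso
      exact hsp (List.prefix_nil.mp (by simpa using hpre))
    | c :: rest =>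
      obtain ⟨f, rfl⟩ : ∃ f, fuel = f + 1 := ⟨fuel - 1, by omega⟩
      rw [pvGo_cons]
      have hpre0 : sp.isPrefixOf (c :: rest) = false := by
        by_contra h
        exact hmin 0 (by omega) (by simpa using List.isPrefixOf_iff_prefix.mp (by simpa using h))
      simp only [hpre0, Bool.false_eq_true, if_false]
      rw [ih rest f (c :: cur) acc (by simp at hf; omega) (by simpa using hpre)
          (fun i hi => by simpa using hmin (i + 1) (by omega))]
      have e1 : f + 1 - (j + 1) - 1 = f - j - 1 := by omega
      have e2 : List.drop (j + 1 + sp.length) (c :: rest) = List.drop (j + sp.length) rest := by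
        rw [show j + 1 + sp.length = (j + sp.length) + 1 by omega, List.drop_succ_cons]
      have e3 : cur.reverse ++ List.take (j + 1) (c :: rest) = (c :: cur).reverse ++ List.take j rest := by
        simp
      rw [e1, e2, e3]

-- splitOn when sp does not occur
lemma pvSplitOn_none (d sp : List Char) (h : ¬ sp <:+: d) :
    PySem.Chars.splitOn d sp = [d] := by
  unfold PySem.Chars.splitOn
  rw [pvGo_none sp d (d.length + 1) [] [] (by omega) h]
  simp

-- splitOn step at the first occurrence (j = find d sp ≥ 0)
lemma pvSplitOn_step (d sp : List Char) (hsp : sp ≠ []) (h : 0 ≤ PySem.Chars.find d sp) :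
    PySem.Chars.splitOn d sp =
      d.take (PySem.Chars.find d sp).toNat ::
        PySem.Chars.splitOn (d.drop ((PySem.Chars.find d sp).toNat + sp.length)) sp := by
  obtain ⟨hp, hmin⟩ := PySem.Chars.find_spec h
  set j := (PySem.Chars.find d sp).toNat with hj
  have hm : 1 ≤ sp.length := by
    cases sp with | nil => exact absurd rfl hsp | cons a b => simp
  have hjm : j + sp.length ≤ d.length := by
    have := hp.length_le
    simp only [List.length_drop] at this
    have hjd : j ≤ d.length := by
      have := PySem.Chars.find_le_length d sp
      omega
    omega
  unfold PySem.Chars.splitOn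
  rw [pvGo_step sp hsp j d (d.length + 1) [] [] (by omega) hp hmin]
  rw [pvGo_acc sp hsp (d.drop (j + sp.length)).length _ le_rfl _ _ _ (by simp; omega)]
  simp [List.length_drop]

-- the B loop computes pvGL of the splitOn chunks of the remaining suffix
lemma pvBGo_eq_gL (sp : List Char) (hsp : sp ≠ []) :
    ∀ fuel (t : List Char) (pos : Nat), pos ≤ t.length → t.length - pos < fuel →
      pvBGo t sp pos fuel =
        pvGL (sp.length : Int) (PySem.Chars.splitOn (t.drop pos) sp) (pos : Int) := by
  intro fuel
  induction fuel with
  | zero => intro t pos _ hf; omega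
  | succ f ih =>
    intro t pos hpos hf
    have hm : 1 ≤ sp.length := by
      cases sp with | nil => exact absurd rfl hsp | cons a b => simp
    rw [pvBGo]
    rw [PySem.Chars.findFrom_natCast t sp pos hpos]
    by_cases hfind : PySem.Chars.find (t.drop pos) sp = -1
    · simp only [hfind, if_true]
      rw [pvSplitOn_none _ sp ((PySem.Chars.find_eq_neg_one_iff _ _).mp hfind)]
      simp only [pvGL, List.length_drop]
      have : ((t.length - pos : Nat) : Int) = (t.length : Int) - (pos : Int) := by omega
      rw [this]; ring_nf
    · simp only [hfind, if_false]
      have hge : 0 ≤ PySem.Chars.find (t.drop pos) sp := by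
        have := PySem.Chars.neg_one_le_find (t.drop pos) sp
        omega
      set j := PySem.Chars.find (t.drop pos) sp with hjdef
      have hne : ¬ ((pos : Int) + j = -1) := by omega
      simp only [hne, if_false]
      rw [pvSplitOn_step _ sp hsp hge]
      have hjn : ((pos : Int) + j).toNat = pos + j.toNat := by omega
      obtain ⟨hp, -⟩ := PySem.Chars.find_spec hge
      have hjm : j.toNat + sp.length ≤ (t.drop pos).length := by
        have := hp.length_le
        simp only [List.length_drop] at this ⊢
        have := PySem.Chars.find_le_length (t.drop pos) sp
        omega
      simp only [List.length_drop] at hjm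
      have hdd : (t.drop pos).drop (j.toNat + sp.length) = t.drop (pos + (j.toNat + sp.length)) := by
        rw [List.drop_drop]
      rw [hjn, hdd]
      have hih := ih t (pos + (j.toNat + sp.length)) (by omega) (by omega)
      have harg : pos + j.toNat + sp.length = pos + (j.toNat + sp.length) := by omega
      rw [harg, hih]
      simp only [pvGL, List.length_take]
      have htk : min j.toNat (t.drop pos).length = j.toNat := by
        simp only [List.length_drop]; omega
      have hcj : (j.toNat : Int) = j := by omega
      rw [htk, hcj]
      have hcp : ((pos + (j.toNat + sp.length) : Nat) : Int) = (pos : Int) + j + (sp.length : Int) := by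
        push_cast; omega
      rw [hcp]

-- A's foldl equals pvGL on the mapped chunk lists
lemma pvFoldA_eq_gL (m : Int) :
    ∀ (chunks : List String) (acc : List (Int × Int)) (p : Int),
      (chunks.foldl
        (fun (st : List (Int × Int) × Int) chunk =>
          (st.1 ++ [(st.2, st.2 + PySem.Str.len chunk)], st.2 + PySem.Str.len chunk + m))
        (acc, p)).1 = acc ++ pvGL m (chunks.map String.toList) p := by
  intro chunks
  induction chunks with
  | nil => intro acc p; simp [pvGL]
  | cons c cs ih =>
    intro acc p
    simp only [List.foldl_cons, List.map_cons, pvGL]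
    rw [ih]
    simp [PySem.Str.len]

-- ===== VERDICT (by name: the statement is the Claim_ definition above) =====
theorem split_with_positions_py_spec : Claim_equal_split_with_positions_py := by
  intro text separator _ hpre
  unfold Spec_split_with_positions_py
  have hsp : separator.toList ≠ [] := by
    intro h
    exact hpre (by
      exact String.toList_eq_nil_iff.mp h)
  unfold split_with_positions_py split_with_positions_py_alt
  have hne : separator.toList.isEmpty = false := by simpa [List.isEmpty_iff] using hsp
  rw [if_neg (by simp [hne])]
  have hsplit := PySem.Str.split?_map text separator
  rw [show PySem.Chars.split? text.toList separator.toList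
        = some (PySem.Chars.splitOn text.toList separator.toList) by
      unfold PySem.Chars.split?; rw [if_neg (by simp [hne])]] at hsplit
  obtain ⟨chunks, hck, hmap⟩ : ∃ chunks, PySem.Str.split? text separator = some chunks ∧
      chunks.map String.toList = PySem.Chars.splitOn text.toList separator.toList := by
    cases h : PySem.Str.split? text separator with
    | none => rw [h] at hsplit; simp at hsplit
    | some cs => rw [h] at hsplit; simp at hsplit; exact ⟨cs, rfl, hsplit⟩
  simp only [hck]
  rw [pvFoldA_eq_gL, hmap]
  rw [pvBGo_eq_gL separator.toList hsp (text.toList.length + 1) text.toList 0 (by omega) (by omega)]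
  simp [PySem.Str.len]
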